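-- pv_equiv track=rewrite | github.com/hassanshamim/adventofcode | 2015/11_passwords.py | increment
-- ===== SOURCE A (Python) =====
-- VALID = 'abcdefghjkmnpqrstuvwxyz'
--
-- def increment(word):
--     if not word:
--         return ''
--
--     head, tail = word[0], word[1:]
--
--     if set(tail) == set('z'):
--         return increment_char(head) + len(tail) * 'a'
--     elif not tail:
--         return increment_char(head)
--     else:
--         return head + increment(tail)
--
-- def increment_char(char):
--     if len(char) > 1:
--         raise TypeError('Expected a single character, not:  {}'.format(char))
--     i = VALID.find(char) + 1
--     i = i % len(VALID)
--     return VALID[i]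
-- ===== SOURCE B (Python) =====
-- VALID = 'abcdefghjkmnpqrstuvwxyz'
-- NEXT = {c: VALID[(i + 1) % len(VALID)] for i, c in enumerate(VALID)}
--
-- def increment(word):
--     chars = list(word)
--     i = len(chars) - 1
--     while i >= 0 and chars[i] == 'z':
--         chars[i] = 'a'
--         i -= 1
--     if i >= 0:
--         chars[i] = NEXT.get(chars[i], 'a')
--     return ''.join(chars)
-- ===== Notes on version B (the rewrite author's own statement) =====
-- stated objective: faster
-- what changed: Replaces A's head-recursion (which slices the tail and rebuilds a set of it at every recursion level) with a single right-to-left carry pass over a character list that resets the trailing run of last-alphabet characters and bumps the preceding character via a precomputed successor dict.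
import Mathlib
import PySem

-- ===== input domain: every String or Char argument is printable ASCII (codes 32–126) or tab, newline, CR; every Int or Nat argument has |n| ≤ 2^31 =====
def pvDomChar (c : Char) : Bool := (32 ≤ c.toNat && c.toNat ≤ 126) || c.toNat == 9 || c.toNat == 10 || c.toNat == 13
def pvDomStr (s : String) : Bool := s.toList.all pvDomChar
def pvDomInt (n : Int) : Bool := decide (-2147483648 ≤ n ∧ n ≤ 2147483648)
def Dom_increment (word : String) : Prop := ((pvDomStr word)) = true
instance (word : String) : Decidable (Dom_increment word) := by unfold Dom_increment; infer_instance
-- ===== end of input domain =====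

-- B replaces A's quadratic head-recursion (string slicing + set(tail) test at every level)
-- by one right-to-left carry pass with a precomputed successor table; objective: faster.


-- ===== PORT A =====
-- VALID = 'abcdefghjkmnpqrstuvwxyz'
def pyVALID : List Char :=
  ['a','b','c','d','e','f','g','h','j','k','m','n','p','q','r','s','t','u','v','w','x','y','z']

-- increment_char(char): i = VALID.find(char) + 1; i = i % len(VALID); return VALID[i].
-- find(char)+1 is ≥ 0 (none → -1+1 = 0), so the Python '%' agrees with Nat '%' here and
-- the resulting index is in range, so the indexing never raises.
def incrementCharA (c : Char) : Char :=
  let i : Nat := (match pyVALID.idxOf? c with | some n => n + 1 | none => 0) % pyVALID.length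
  pyVALID.getD i 'a'

-- increment(word), recursion on the character list (word[0] / word[1:] = head / tail);
-- 'set(tail) == set('z')' ported with PySem.Set.
def incARec : List Char → List Char
  | [] => []                                   -- if not word: return ''
  | h :: t =>
    if PySem.Set.equal (PySem.Set.ofList t) (PySem.Set.ofList ['z']) then
      incrementCharA h :: t.map (fun _ => 'a')  -- increment_char(head) + len(tail)*'a'
    else if t = [] then [incrementCharA h]      -- elif not tail: increment_char(head)
    else h :: incARec t                         -- else head + increment(tail)

def increment (word : String) : String := String.mk (incARec word.toList)

-- ===== PORT B =====
-- NEXT = {c: VALID[(i+1) % len(VALID)] for i, c in enumerate(VALID)}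
def pyNEXT : PySem.Dict Char Char :=
  PySem.Dict.ofList (pyVALID.zipIdx.map
    (fun (ci : Char × Nat) => (ci.1, pyVALID.getD ((ci.2 + 1) % pyVALID.length) 'a')))

-- the while loop of Source B, running over the reversed character list:
-- turn trailing 'z's into 'a's, then replace the first non-'z' by NEXT.get(c, 'a')
def carryB : List Char → List Char
  | [] => []
  | c :: rest =>
    if c = 'z' then 'a' :: carryB rest
    else PySem.Dict.getD pyNEXT c 'a' :: rest

def increment_alt (word : String) : String :=
  String.mk ((carryB word.toList.reverse).reverse)

-- ===== PRECONDITION & SPEC =====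
def Spec_increment (word : String) (out : String) : Prop := out = increment_alt word
instance (word : String) (out : String) : Decidable (Spec_increment word out) := by unfold Spec_increment; infer_instance

-- ===== CLAIM (what is proved, stated in full; the proofs are below) =====
def Claim_equal_increment : Prop := ∀ (word : String), Dom_increment word → Spec_increment word (increment word)

-- ===== LEMMAS AND PROOFS =====

-- the set(tail) == set('z') condition ↔ tail nonempty and all-'z'
theorem setcond_iff (t : List Char) :
    PySem.Set.equal (PySem.Set.ofList t) (PySem.Set.ofList ['z']) = true ↔
      ('z' ∈ t ∧ ∀ x ∈ t, x = 'z') := by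
  rw [PySem.Set.equal_iff]
  constructor
  · intro h
    refine ⟨?_, ?_⟩
    · have := (h 'z').2; simp [PySem.Set.mem_ofList] at this; exact this
    · intro x hx
      have := (h x).1; simp [PySem.Set.mem_ofList] at this; exact this hx
  · rintro ⟨hz, hall⟩ x
    simp only [PySem.Set.mem_ofList, List.mem_singleton]
    exact ⟨fun hx => hall x hx, fun hx => hx ▸ hz⟩

-- NEXT.get(c, 'a') = increment_char(c), for every character
theorem next_eq_inc (h : Char) : PySem.Dict.getD pyNEXT h 'a' = incrementCharA h := by
  by_cases hm : h ∈ pyVALID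
  · fin_cases hm <;> decide
  · have hk : pyNEXT.keys = pyVALID := by decide
    have hc : pyNEXT.contains h = false := by
      rw [PySem.Dict.contains_eq_decide_mem_keys, hk]
      simpa using hm
    rw [PySem.Dict.getD_of_not_contains pyNEXT 'a' hc]
    have hi : pyVALID.idxOf? h = none := by
      rw [List.idxOf?_eq_none_iff]; exact hm
    simp [incrementCharA, hi]
    decide

-- one carry step on a single char agrees with A's increment_char
theorem carryB_single (h : Char) : carryB [h] = [incrementCharA h] := by
  by_cases hz : h = 'z'
  · subst hz; simp [carryB]; decide
  · simp [carryB, hz, next_eq_inc]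

theorem carryB_allz (l r : List Char) (h : ∀ x ∈ l, x = 'z') :
    carryB (l ++ r) = l.map (fun _ => 'a') ++ carryB r := by
  induction l with
  | nil => simp
  | cons c cs ih =>
    have hc : c = 'z' := h c (by simp)
    simp [carryB, hc, ih (fun x hx => h x (by simp [hx]))]

theorem carryB_stop (l r : List Char) (h : ∃ x ∈ l, x ≠ 'z') :
    carryB (l ++ r) = carryB l ++ r := by
  induction l with
  | nil => simp at h
  | cons c cs ih =>
    by_cases hc : c = 'z'
    · subst hc
      have h' : ∃ x ∈ cs, x ≠ 'z' := by
        rcases h with ⟨x, hx, hxz⟩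
        rcases List.mem_cons.1 hx with rfl | hx
        · exact absurd rfl hxz
        · exact ⟨x, hx, hxz⟩
      simp [carryB, ih h']
    · simp [carryB, hc]

theorem main_eq (l : List Char) : incARec l = (carryB l.reverse).reverse := by
  induction l with
  | nil => simp [incARec, carryB]
  | cons h t ih =>
    by_cases hcond :
        PySem.Set.equal (PySem.Set.ofList t) (PySem.Set.ofList ['z']) = true
    · obtain ⟨hz, hall⟩ := (setcond_iff t).1 hcond
      have hallr : ∀ x ∈ t.reverse, x = 'z' := fun x hx => hall x (List.mem_reverse.1 hx)
      simp only [incARec, hcond, if_true, List.reverse_cons]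
      rw [carryB_allz _ _ hallr, carryB_single]
      simp [List.map_reverse]
    · by_cases ht : t = []
      · subst ht
        simp only [incARec, hcond, if_true, List.reverse_cons, List.reverse_nil,
          List.nil_append]
        rw [carryB_single]; simp
      · have hex : ∃ x ∈ t.reverse, x ≠ 'z' := by
          by_contra hno
          push Not at hno
          have hall : ∀ x ∈ t, x = 'z' := fun x hx => hno x (List.mem_reverse.2 hx)
          have hz : 'z' ∈ t := by
            rcases List.exists_mem_of_ne_nil t ht with ⟨x, hx⟩
            exact (hall x hx) ▸ hx
          exact hcond ((setcond_iff t).2 ⟨hz, hall⟩)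
        simp only [incARec, hcond, if_false, ht, List.reverse_cons]
        rw [carryB_stop _ _ hex]
        simp [ih]

-- ===== VERDICT (by name: the statement is the Claim_ definition above) =====
theorem increment_spec : Claim_equal_increment := by
  intro word _
  unfold Spec_increment increment increment_alt
  rw [main_eq]
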